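-- pv_equiv track=rewrite | github.com/arm/metis | src/metis/engine/graphs/triage/adjudication.py | _is_resolved_macro_hop
-- ===== SOURCE A (Python) =====
-- def _is_resolved_macro_hop(hop: str, resolved_macros: set[str]) -> bool:
--     if not resolved_macros:
--         return False
--     text = str(hop or "").strip()
--     if not text:
--         return False
--     prefixes = (
--         "MACRO_SEMANTICS_UNRESOLVED:",
--         "MACRO_SEMANTICS_WEAK:",
--         "MACRO_DEFINITION_UNRESOLVED:",
--     )
--     for prefix in prefixes:
--         if not text.startswith(prefix):
--             continue
--         suffix = text[len(prefix) :]
--         macro = suffix.split(":", 1)[0].strip()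
--         return macro in resolved_macros
--     return False
-- ===== SOURCE B (Python) =====
-- _MARKER_KEYS = {
--     "MACRO_SEMANTICS_UNRESOLVED",
--     "MACRO_SEMANTICS_WEAK",
--     "MACRO_DEFINITION_UNRESOLVED",
-- }
--
--
-- def _is_resolved_macro_hop(hop: str, resolved_macros: set[str]) -> bool:
--     if not resolved_macros:
--         return False
--     text = str(hop or "").strip()
--     if not text:
--         return False
--     parts = text.split(":", 2)
--     if len(parts) < 2:
--         return False
--     if parts[0] not in _MARKER_KEYS:
--         return False
--     return parts[1].strip() in resolved_macros
-- ===== Notes on version B (the rewrite author's own statement) =====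
-- stated objective: simpler
-- what changed: B replaces A's loop over three 'startswith' prefixes (each slicing and re-splitting the suffix) by a single split(':', 2) parse of the text followed by a key-set membership test on the first segment.
import Mathlib
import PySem

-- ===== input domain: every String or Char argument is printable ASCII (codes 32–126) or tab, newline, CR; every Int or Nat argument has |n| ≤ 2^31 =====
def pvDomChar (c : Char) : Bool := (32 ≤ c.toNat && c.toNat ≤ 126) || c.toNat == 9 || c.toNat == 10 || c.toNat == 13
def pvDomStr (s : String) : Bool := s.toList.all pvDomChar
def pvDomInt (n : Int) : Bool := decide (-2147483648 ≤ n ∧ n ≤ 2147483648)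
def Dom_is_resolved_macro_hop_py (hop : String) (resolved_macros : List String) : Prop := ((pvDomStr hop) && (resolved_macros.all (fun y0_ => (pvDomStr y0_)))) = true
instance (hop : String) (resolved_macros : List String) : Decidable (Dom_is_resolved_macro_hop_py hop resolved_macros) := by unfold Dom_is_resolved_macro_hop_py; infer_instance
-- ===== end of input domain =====

-- B replaces A's three-iteration startswith loop by a single split(':', 2) parse plus a key-set membership (objective: simpler).

-- ===== PORT A =====
-- the for-loop over the prefix tuple: first matching prefix decides the result, otherwise fall through
def pyA_prefix_loop (text : String) (resolved_macros : List String) : List String → Bool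
  | [] => false
  | pfx :: rest =>
    if !(PySem.Str.startswith text pfx) then
      pyA_prefix_loop text resolved_macros rest
    else
      -- suffix = text[len(prefix):]
      let suffix := PySem.Str.slice text (some (PySem.Str.len pfx)) none
      -- macro = suffix.split(":", 1)[0].strip()   ([0] of a split result, which is always nonempty)
      let mac := PySem.Str.strip ((((PySem.Str.splitMax? suffix ":" 1).getD []).headD ""))
      resolved_macros.contains mac

def is_resolved_macro_hop_py (hop : String) (resolved_macros : List String) : Bool :=
  if resolved_macros.isEmpty then false
  else
    let text := PySem.Str.strip (if hop = "" then "" else hop)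
    if text = "" then false
    else
      pyA_prefix_loop text resolved_macros
        ["MACRO_SEMANTICS_UNRESOLVED:", "MACRO_SEMANTICS_WEAK:", "MACRO_DEFINITION_UNRESOLVED:"]

-- ===== PORT B =====
def pyB_marker_keys : List String :=
  ["MACRO_SEMANTICS_UNRESOLVED", "MACRO_SEMANTICS_WEAK", "MACRO_DEFINITION_UNRESOLVED"]

def is_resolved_macro_hop_py_alt (hop : String) (resolved_macros : List String) : Bool :=
  if resolved_macros.isEmpty then false
  else
    let text := PySem.Str.strip (if hop = "" then "" else hop)
    if text = "" then false
    else
      let parts := (PySem.Str.splitMax? text ":" 2).getD []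
      if parts.length < 2 then false
      else if !(pyB_marker_keys.contains (parts.headD "")) then false
      else resolved_macros.contains (PySem.Str.strip (parts.getD 1 ""))

-- ===== PRECONDITION & SPEC =====
def Spec_is_resolved_macro_hop_py (hop : String) (resolved_macros : List String) (out : Bool) : Prop := out = is_resolved_macro_hop_py_alt hop resolved_macros
instance (hop : String) (resolved_macros : List String) (out : Bool) : Decidable (Spec_is_resolved_macro_hop_py hop resolved_macros out) := by unfold Spec_is_resolved_macro_hop_py; infer_instance

-- ===== CLAIM (what is proved, stated in full; the proofs are below) =====
def Claim_equal_is_resolved_macro_hop_py : Prop := ∀ (hop : String) (resolved_macros : List String), Dom_is_resolved_macro_hop_py hop resolved_macros → Spec_is_resolved_macro_hop_py hop resolved_macros (is_resolved_macro_hop_py hop resolved_macros)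

-- ===== LEMMAS AND PROOFS =====

-- a simple recursive model of Python's  s.split(c, m)  (proof helper only)
def pvSplit1 (c : Char) : Nat → List Char → List Char → List (List Char)
  | _, pre, [] => [pre]
  | 0, pre, l => [pre ++ l]
  | m+1, pre, c' :: rest =>
    if c' = c then pre :: pvSplit1 c m [] rest
    else pvSplit1 c (m+1) (pre ++ [c']) rest

lemma pvSplit1_ne_nil (c : Char) (m : Nat) (pre l : List Char) : pvSplit1 c m pre l ≠ [] := by
  induction l generalizing m pre with
  | nil => cases m <;> simp [pvSplit1]
  | cons c' rest ih =>
    cases m with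
    | zero => simp [pvSplit1]
    | succ m => simp only [pvSplit1]; split_ifs <;> simp [ih]

lemma go_eq_pvSplit1 (c : Char) : ∀ (fuel : Nat) (l : List Char) (m : Nat) (cur : List Char)
    (acc : List (List Char)), l.length < fuel →
    PySem.Chars.splitOnMax.go [c] fuel m l cur acc = acc.reverse ++ pvSplit1 c m cur.reverse l := by
  intro fuel
  induction fuel with
  | zero => intro l m cur acc h; omega
  | succ f ih =>
    intro l m cur acc h
    cases l with
    | nil => cases m <;> simp [PySem.Chars.splitOnMax.go, pvSplit1]
    | cons c' rest =>
      cases m with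
      | zero => simp [PySem.Chars.splitOnMax.go, pvSplit1]
      | succ m =>
        simp only [PySem.Chars.splitOnMax.go]
        by_cases hc : c' = c
        · subst hc
          simp only [List.isPrefixOf, if_neg (Nat.succ_ne_zero m)]
          simp only [BEq.rfl, Bool.true_and, if_pos]
          simp only [List.length_cons, List.length_nil, List.drop_succ_cons, List.drop_zero,
            Nat.add_sub_cancel]
          rw [ih rest m [] (cur.reverse :: acc) (by simpa using h)]
          simp [pvSplit1]
        · have hpre : ([c].isPrefixOf (c' :: rest)) = false := by
            simp [List.isPrefixOf]; intro hceq; exact absurd hceq.symm hc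
          simp only [if_neg (Nat.succ_ne_zero m), hpre, if_neg (Bool.false_ne_true)]
          rw [ih rest (m+1) (c' :: cur) acc (by simpa using h)]
          simp [pvSplit1, hc]

lemma splitOnMax_eq_pvSplit1 (c : Char) (cs : List Char) (n : Int) (hn : 0 ≤ n) :
    PySem.Chars.splitOnMax cs [c] n = pvSplit1 c n.toNat [] cs := by
  unfold PySem.Chars.splitOnMax
  rw [if_neg (by omega)]
  simpa using go_eq_pvSplit1 c (cs.length + 1) cs n.toNat [] [] (by omega)

lemma pvSplit1_headD (c : Char) : ∀ (m : Nat) (pre l : List Char),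
    (pvSplit1 c (m+1) pre l).headD [] = pre ++ l.takeWhile (· ≠ c) := by
  intro m pre l
  induction l generalizing m pre with
  | nil => simp [pvSplit1]
  | cons c' rest ih =>
    simp only [pvSplit1]
    by_cases hc : c' = c
    · simp [hc]
    · rw [if_neg hc, ih]
      simp [hc]

lemma pvSplit1_len2 (c : Char) : ∀ (m : Nat) (pre l : List Char),
    2 ≤ (pvSplit1 c (m+1) pre l).length ↔ c ∈ l := by
  intro m pre l
  induction l generalizing m pre with
  | nil => simp [pvSplit1]
  | cons c' rest ih =>
    simp only [pvSplit1]
    by_cases hc : c' = c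
    · have hne := pvSplit1_ne_nil c m [] rest
      simp only [if_pos hc, List.length_cons, List.mem_cons]
      constructor
      · intro _; exact Or.inl hc.symm
      · intro _
        have h1 : 1 ≤ (pvSplit1 c m [] rest).length := by
          cases h : pvSplit1 c m [] rest with
          | nil => exact absurd h hne
          | cons a t => simp
        omega
    · simp only [if_neg hc, List.mem_cons]
      rw [ih]
      constructor
      · exact Or.inr
      · rintro (h | h)
        · exact absurd h.symm hc
        · exact h

lemma pvSplit1_cons_of_mem (c : Char) : ∀ (m : Nat) (pre l : List Char), c ∈ l →
    pvSplit1 c (m+1) pre l =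
      (pre ++ l.takeWhile (· ≠ c)) :: pvSplit1 c m [] ((l.dropWhile (· ≠ c)).tail) := by
  intro m pre l hmem
  induction l generalizing m pre with
  | nil => simp at hmem
  | cons c' rest ih =>
    simp only [pvSplit1]
    by_cases hc : c' = c
    · simp [hc]
    · have hmem' : c ∈ rest := by
        rcases List.mem_cons.mp hmem with h | h
        · exact absurd h.symm hc
        · exact h
      simp only [if_neg hc]
      rw [ih _ _ hmem']
      simp [hc, List.append_assoc]

lemma decomp_of_mem (c : Char) : ∀ (cs : List Char), c ∈ cs →
    cs = cs.takeWhile (· ≠ c) ++ c :: (cs.dropWhile (· ≠ c)).tail := by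
  intro cs hmem
  induction cs with
  | nil => simp at hmem
  | cons c' rest ih =>
    by_cases hc : c' = c
    · subst hc; simp
    · have hmem' : c ∈ rest := by
        rcases List.mem_cons.mp hmem with h | h
        · exact absurd h.symm hc
        · exact h
      simp only [List.takeWhile_cons, List.dropWhile_cons]
      simp only [ne_eq, hc, not_false_eq_true, decide_true, if_true]
      exact congrArg (c' :: ·) (ih hmem')

lemma tw_of_prefix (c : Char) : ∀ (k t cs : List Char), c ∉ k → cs = k ++ c :: t →
    cs.takeWhile (· ≠ c) = k ∧ (cs.dropWhile (· ≠ c)).tail = t := by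
  intro k t cs hk hcs
  subst hcs
  induction k with
  | nil => simp
  | cons a k' ih =>
    have ha : a ≠ c := fun h => hk (h ▸ List.mem_cons_self)
    have hk' : c ∉ k' := fun h => hk (List.mem_cons_of_mem _ h)
    obtain ⟨h1, h2⟩ := ih hk'
    simp only [List.cons_append, List.takeWhile_cons, List.dropWhile_cons]
    simp only [ne_eq, decide_not] at h1 h2 ⊢
    simp [ha, h1, h2]

lemma startswith_key (c : Char) (k cs : List Char) (hk : c ∉ k) :
    PySem.Chars.startswith cs (k ++ [c]) = true ↔
      c ∈ cs ∧ cs.takeWhile (· ≠ c) = k := by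
  rw [PySem.Chars.startswith_iff]
  constructor
  · rintro ⟨t, ht⟩
    have hcs : cs = k ++ c :: t := by simpa using ht.symm
    have h2 := tw_of_prefix c k t cs hk hcs
    exact ⟨hcs ▸ (by simp), h2.1⟩
  · rintro ⟨hmem, htw⟩
    refine ⟨(cs.dropWhile (· ≠ c)).tail, ?_⟩
    conv_rhs => rw [decomp_of_mem c cs hmem]
    simp only [ne_eq, decide_not] at htw ⊢
    simp [htw]

lemma splitMax_colon (s : String) (n : Int) (hn : 0 ≤ n) :
    PySem.Str.splitMax? s ":" n = some ((pvSplit1 ':' n.toNat [] s.toList).map String.ofList) := by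
  unfold PySem.Str.splitMax? PySem.Chars.splitMax?
  have h1 : (":" : String).toList = [':'] := by decide
  rw [h1]
  simp [splitOnMax_eq_pvSplit1 ':' s.toList n hn]

lemma headD_map_ofList (xs : List (List Char)) (h : xs ≠ []) :
    (xs.map String.ofList).headD "" = String.ofList (xs.headD []) := by
  cases xs with
  | nil => exact absurd rfl h
  | cons a t => simp

lemma startswith_text (text K : String) (hK : (':' : Char) ∉ K.toList) :
    PySem.Str.startswith text (K ++ ":") = true ↔
      (':' : Char) ∈ text.toList ∧ text.toList.takeWhile (· ≠ ':') = K.toList := by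
  have hKL : (K ++ ":").toList = K.toList ++ [':'] := by
    rw [String.toList_append]; rfl
  rw [show PySem.Str.startswith text (K ++ ":") =
        PySem.Chars.startswith text.toList (K.toList ++ [':']) from by
      simp [PySem.Str.startswith, hKL]]
  exact startswith_key ':' K.toList text.toList hK

lemma A_branch (text K : String) (hK : (':' : Char) ∉ K.toList)
    (hsw : PySem.Str.startswith text (K ++ ":") = true) :
    PySem.Str.strip ((((PySem.Str.splitMax? (PySem.Str.slice text (some (PySem.Str.len (K ++ ":"))) none) ":" 1).getD []).headD "")) =
      PySem.Str.strip (String.ofList (((text.toList.dropWhile (· ≠ ':')).tail).takeWhile (· ≠ ':'))) := by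
  obtain ⟨hmem, htw⟩ := (startswith_text text K hK).mp hsw
  have hdecomp := decomp_of_mem ':' text.toList hmem
  have hcs : text.toList = (K.toList ++ [':']) ++ (text.toList.dropWhile (· ≠ ':')).tail := by
    rw [List.append_assoc, List.singleton_append, ← htw]
    exact hdecomp
  have hsuffix : (PySem.Str.slice text (some (PySem.Str.len (K ++ ":"))) none).toList =
      (text.toList.dropWhile (· ≠ ':')).tail := by
    have hlen : PySem.Str.len (K ++ ":") = (((K.toList.length + 1 : Nat) : Int)) := by
      simp [PySem.Str.len, String.toList_append]
    rw [PySem.Str.slice, String.toList_ofList, PySem.Chars.slice_eq_listSlice, hlen,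
      PySem.List.slice_from _ (by positivity)]
    rw [Int.toNat_natCast]
    conv_lhs => rw [hcs]
    rw [show K.toList.length + 1 = (K.toList ++ [':']).length by simp]
    exact List.drop_left
  rw [splitMax_colon _ 1 (by norm_num), Option.getD_some,
    headD_map_ofList _ (pvSplit1_ne_nil _ _ _ _), hsuffix]
  rw [show ((1:Int).toNat = 0 + 1) from rfl, pvSplit1_headD]
  simp

lemma ofList_eq_iff (l : List Char) (s : String) :
    String.ofList l = s ↔ l = s.toList := by
  constructor
  · intro h; rw [← h, String.toList_ofList]
  · intro h; rw [h, String.ofList_toList]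

lemma getD1_cons (a : String) (t : List String) : (a :: t).getD 1 "" = t.headD "" := by
  cases t <;> simp

lemma loop_cons_neg (text : String) (r : List String) (p : String) (rest : List String)
    (h : PySem.Str.startswith text p = false) :
    pyA_prefix_loop text r (p :: rest) = pyA_prefix_loop text r rest := by
  simp only [pyA_prefix_loop]
  rw [h]
  rfl

lemma loop_cons_pos (text : String) (r : List String) (K : String) (rest : List String)
    (hK : (':' : Char) ∉ K.toList)
    (hsw : PySem.Str.startswith text (K ++ ":") = true) :
    pyA_prefix_loop text r ((K ++ ":") :: rest) =
      r.contains (PySem.Str.strip (String.ofList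
        (((text.toList.dropWhile (· ≠ ':')).tail).takeWhile (· ≠ ':')))) := by
  simp only [pyA_prefix_loop, hsw, Bool.not_true, Bool.false_eq_true, if_false]
  rw [A_branch text K hK hsw]

lemma startswith_false (text : String) (K : String) (hK : (':' : Char) ∉ K.toList)
    (h : ¬ ((':' : Char) ∈ text.toList ∧ text.toList.takeWhile (· ≠ ':') = K.toList)) :
    PySem.Str.startswith text (K ++ ":") = false := by
  rw [← Bool.not_eq_true, startswith_text text K hK]
  exact h

lemma core_eq (text : String) (r : List String) :
    pyA_prefix_loop text r
        ["MACRO_SEMANTICS_UNRESOLVED:", "MACRO_SEMANTICS_WEAK:", "MACRO_DEFINITION_UNRESOLVED:"] =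
      (let parts := (PySem.Str.splitMax? text ":" 2).getD []
       if parts.length < 2 then false
       else if !(pyB_marker_keys.contains (parts.headD "")) then false
       else r.contains (PySem.Str.strip (parts.getD 1 ""))) := by
  have hsplit := splitMax_colon text 2 (by norm_num)
  rw [show ("MACRO_SEMANTICS_UNRESOLVED:" : String) = "MACRO_SEMANTICS_UNRESOLVED" ++ ":" from by decide,
    show ("MACRO_SEMANTICS_WEAK:" : String) = "MACRO_SEMANTICS_WEAK" ++ ":" from by decide,
    show ("MACRO_DEFINITION_UNRESOLVED:" : String) = "MACRO_DEFINITION_UNRESOLVED" ++ ":" from by decide]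
  by_cases hmem : (':' : Char) ∈ text.toList
  case neg =>
    -- no colon: every prefix fails to match and the split has a single piece
    have hlen : ((PySem.Str.splitMax? text ":" 2).getD []).length < 2 := by
      rw [hsplit, Option.getD_some, List.length_map]
      have h2 : ¬ 2 ≤ (pvSplit1 ':' (2:Int).toNat [] text.toList).length :=
        fun h => hmem ((pvSplit1_len2 ':' 1 [] text.toList).mp h)
      omega
    rw [loop_cons_neg _ _ _ _ (startswith_false text _ (by decide) (fun h => hmem h.1)),
      loop_cons_neg _ _ _ _ (startswith_false text _ (by decide) (fun h => hmem h.1)),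
      loop_cons_neg _ _ _ _ (startswith_false text _ (by decide) (fun h => hmem h.1))]
    simp only [pyA_prefix_loop]
    simp [hlen]
  case pos =>
    have hcons := pvSplit1_cons_of_mem ':' 1 [] text.toList hmem
    simp only [List.nil_append] at hcons
    have htail_ne := pvSplit1_ne_nil ':' 1 [] ((text.toList.dropWhile (· ≠ ':')).tail)
    have hparts : (PySem.Str.splitMax? text ":" 2).getD [] =
        String.ofList (text.toList.takeWhile (· ≠ ':')) ::
          (pvSplit1 ':' 1 [] ((text.toList.dropWhile (· ≠ ':')).tail)).map String.ofList := by
      rw [hsplit, Option.getD_some]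
      rw [show ((2:Int).toNat = 1 + 1) from rfl, hcons]
      simp
    have hlen2 : ¬ ((PySem.Str.splitMax? text ":" 2).getD []).length < 2 := by
      rw [hparts]
      cases h : pvSplit1 ':' 1 [] ((text.toList.dropWhile (· ≠ ':')).tail) with
      | nil => exact absurd h htail_ne
      | cons a t => simp
    have hget1 : ((PySem.Str.splitMax? text ":" 2).getD []).getD 1 "" =
        String.ofList (((text.toList.dropWhile (· ≠ ':')).tail).takeWhile (· ≠ ':')) := by
      rw [hparts, getD1_cons, headD_map_ofList _ htail_ne]
      have h0 := pvSplit1_headD ':' 0 [] ((text.toList.dropWhile (· ≠ ':')).tail)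
      simpa using congrArg String.ofList h0
    have hhead : ((PySem.Str.splitMax? text ":" 2).getD []).headD "" =
        String.ofList (text.toList.takeWhile (· ≠ ':')) := by
      rw [hparts]; simp
    simp only [if_neg hlen2, hhead, hget1]
    by_cases h1 : text.toList.takeWhile (· ≠ ':') = ("MACRO_SEMANTICS_UNRESOLVED" : String).toList
    · rw [loop_cons_pos _ _ _ _ (by decide) ((startswith_text text _ (by decide)).mpr ⟨hmem, h1⟩)]
      have hc : pyB_marker_keys.contains
          (String.ofList (text.toList.takeWhile (· ≠ ':'))) = true := by
        simp only [ne_eq, decide_not] at h1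
        simp [pyB_marker_keys, h1]
      rw [hc]
      simp
    · rw [loop_cons_neg _ _ _ _ (startswith_false text _ (by decide) (fun h => h1 h.2))]
      by_cases h2 : text.toList.takeWhile (· ≠ ':') = ("MACRO_SEMANTICS_WEAK" : String).toList
      · rw [loop_cons_pos _ _ _ _ (by decide) ((startswith_text text _ (by decide)).mpr ⟨hmem, h2⟩)]
        have hc : pyB_marker_keys.contains
            (String.ofList (text.toList.takeWhile (· ≠ ':'))) = true := by
          simp only [ne_eq, decide_not] at h2
          simp [pyB_marker_keys, h2]
        rw [hc]
        simp
      · rw [loop_cons_neg _ _ _ _ (startswith_false text _ (by decide) (fun h => h2 h.2))]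
        by_cases h3 : text.toList.takeWhile (· ≠ ':') = ("MACRO_DEFINITION_UNRESOLVED" : String).toList
        · rw [loop_cons_pos _ _ _ _ (by decide) ((startswith_text text _ (by decide)).mpr ⟨hmem, h3⟩)]
          have hc : pyB_marker_keys.contains
              (String.ofList (text.toList.takeWhile (· ≠ ':'))) = true := by
            simp only [ne_eq, decide_not] at h3
            simp [pyB_marker_keys, h3]
          rw [hc]
          simp
        · rw [loop_cons_neg _ _ _ _ (startswith_false text _ (by decide) (fun h => h3 h.2))]
          have hc : pyB_marker_keys.contains
              (String.ofList (text.toList.takeWhile (· ≠ ':'))) = false := by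
            simp only [ne_eq, decide_not] at h1 h2 h3
            simp at h1 h2 h3
            simp [pyB_marker_keys, ofList_eq_iff, h1, h2, h3]
          simp only [pyA_prefix_loop, hc]
          simp

-- ===== VERDICT (by name: the statement is the Claim_ definition above) =====
theorem is_resolved_macro_hop_py_spec : Claim_equal_is_resolved_macro_hop_py := by
  intro hop r _
  unfold Spec_is_resolved_macro_hop_py is_resolved_macro_hop_py is_resolved_macro_hop_py_alt
  by_cases h1 : r.isEmpty = true
  · rw [if_pos h1, if_pos h1]
  · rw [if_neg h1, if_neg h1]
    by_cases h2 : PySem.Str.strip (if hop = "" then "" else hop) = ""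
    · rw [if_pos h2, if_pos h2]
    · rw [if_neg h2, if_neg h2]
      exact core_eq _ r
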